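-- pv_equiv track=rewrite | github.com/maeeri/tira | Wk4/test.py | loop
-- ===== SOURCE A (Python) =====
-- def loop(s, i, temp):
--     r = compare_chars(s[i], s[i+1]) if i < len(s)-1 else s[i]
--     temp += r if i == len(s)-2 else r[0]
--     if r[0] == s[i]:
--         i += 1
--     else:
--         i += 2
--     if i < len(s) and r == s[i]:
--         loop(s, i, temp)
--     return temp, i
--
-- def compare_chars(c1, c2):
--     if c1 == c2:
--         return 'a' if c1 == 'z' else chr(ord(c1)+1)
--     else: return c1 + c2
-- ===== SOURCE B (Python) =====
-- def loop(s, i, temp):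
--     # Flat, non-recursive: A's recursive self-call discards its result and has
--     # no side effects, so the answer is computed directly in one pass.
--     c = s[i]
--     if i < len(s) - 1:
--         d = s[i + 1]
--         if c == d:
--             r = 'a' if c == 'z' else chr(ord(c) + 1)
--         else:
--             r = c + d
--     else:
--         r = c
--     temp += r if i == len(s) - 2 else r[0]
--     return temp, i + (1 if r[0] == c else 2)
-- ===== Notes on version B (the rewrite author's own statement) =====
-- stated objective: simpler
-- what changed: B is flat and non-recursive with the compare_chars helper inlined: A's recursive self-call discards its result and has no side effects on the admitted inputs, so B drops it and computes the appended piece and the advanced index directly.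
import Mathlib
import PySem

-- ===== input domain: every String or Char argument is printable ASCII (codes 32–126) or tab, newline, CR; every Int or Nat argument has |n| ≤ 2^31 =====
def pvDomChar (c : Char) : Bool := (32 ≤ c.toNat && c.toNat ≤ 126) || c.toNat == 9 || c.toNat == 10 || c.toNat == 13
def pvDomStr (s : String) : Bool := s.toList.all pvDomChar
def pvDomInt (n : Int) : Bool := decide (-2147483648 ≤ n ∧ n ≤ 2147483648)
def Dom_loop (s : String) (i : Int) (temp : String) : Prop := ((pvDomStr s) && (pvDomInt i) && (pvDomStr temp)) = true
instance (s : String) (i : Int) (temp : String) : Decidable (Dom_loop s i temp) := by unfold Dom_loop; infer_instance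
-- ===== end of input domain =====

-- B is the same transformation written flat and non-recursive (helper inlined): A's
-- recursive self-call discards its result and has no side effects, so B omits it (objective: simpler).

-- ===== PORT A =====
-- helper compare_chars, kept as a helper as in A
def compareChars (c1 c2 : Char) : String :=
  if c1 = c2 then
    (if c1 = 'z' then "a" else String.ofList [Char.ofNat (c1.toNat + 1)])
  else String.ofList [c1, c2]

-- literal port of A; where Python raises IndexError (s[i] out of range) the port
-- returns (temp, i) / uses "" — those inputs are excluded by Pre_loop
def loop (s : String) (i : Int) (temp : String) : String × Int :=
  match PySem.Str.pyGet? s i with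
  | none => (temp, i)
  | some c =>
    let r : String :=
      if i < PySem.Str.len s - 1 then
        (match PySem.Str.pyGet? s (i + 1) with
         | none => ""
         | some d => compareChars c d)
      else String.ofList [c]
    let temp2 := temp ++ (if i = PySem.Str.len s - 2 then r else String.ofList (r.toList.take 1))
    let i2 : Int := if r.toList[0]? = some c then i + 1 else i + 2
    if h : i2 < PySem.Str.len s ∧
        (PySem.Str.pyGet? s i2).map (fun ch => String.ofList [ch]) = some r then
      let _ := loop s i2 temp2   -- A's dead recursive call (result discarded)
      (temp2, i2)
    else (temp2, i2)
termination_by (PySem.Str.len s - i).toNat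
decreasing_by
  obtain ⟨h1, -⟩ := h
  simp only [i2] at h1
  split_ifs at h1 ⊢ <;> omega

-- ===== PORT B =====
def loop_alt (s : String) (i : Int) (temp : String) : String × Int :=
  match PySem.Str.pyGet? s i with
  | none => (temp, i)
  | some c =>
    let r : String :=
      if i < PySem.Str.len s - 1 then
        (match PySem.Str.pyGet? s (i + 1) with
         | none => ""
         | some d =>
             if c = d then (if c = 'z' then "a" else String.ofList [Char.ofNat (c.toNat + 1)])
             else String.ofList [c, d])
      else String.ofList [c]
    (temp ++ (if i = PySem.Str.len s - 2 then r else String.ofList (r.toList.take 1)),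
     i + (if r.toList[0]? = some c then 1 else 2))

-- ===== PRECONDITION & SPEC =====
-- Pre_: exactly the inputs where Python A returns (s[i] in range; the recursion then never raises)
def Pre_loop (s : String) (i : Int) (temp : String) : Prop :=
  -(PySem.Str.len s) ≤ i ∧ i < PySem.Str.len s
instance (s : String) (i : Int) (temp : String) : Decidable (Pre_loop s i temp) := by
  unfold Pre_loop; infer_instance

def pvWitness_loop : String × Int × String := ("abba", 1, "x")

def Spec_loop (s : String) (i : Int) (temp : String) (out : String × Int) : Prop := out = loop_alt s i temp
instance (s : String) (i : Int) (temp : String) (out : String × Int) : Decidable (Spec_loop s i temp out) := by unfold Spec_loop; infer_instance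

-- ===== CLAIM (what is proved, stated in full; the proofs are below) =====
def Claim_equal_loop : Prop := ∀ (s : String) (i : Int) (temp : String), Dom_loop s i temp → Pre_loop s i temp → Spec_loop s i temp (loop s i temp)

-- ===== LEMMAS AND PROOFS =====
theorem loop_eq_alt (s : String) (i : Int) (temp : String) : loop s i temp = loop_alt s i temp := by
  rw [loop.eq_def, loop_alt]
  cases hc : PySem.Str.pyGet? s i with
  | none => rfl
  | some c =>
    simp only [compareChars]
    split <;> rename_i h <;> simp_all <;> split_ifs <;> omega

-- ===== VERDICT (by name: the statement is the Claim_ definition above) =====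
theorem loop_spec : Claim_equal_loop := by
  intro s i temp _ _
  unfold Spec_loop
  exact loop_eq_alt s i temp
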